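-- pv_equiv track=rewrite | github.com/niallmcelvogue/Solving-Karnaugh-Maps-API | backend/SolveKMap/kMapSolver.py | binary_to_letter
-- ===== SOURCE A (Python) =====
-- def binary_to_letter(s, POS):
--     out = ''
--     c = 'a'
--     more = False
--     n = 0
--     for i in range(len(s)):
--         # if it is a range a-zA-Z
--         if more == False:
--             if s[i] == '1':
--                 out = out + c
--             elif s[i] == '0':
--                 out = out + c + '\''
--
--         if more == True:
--             if s[i] == '1':
--                 out = out + c + str(n)
--             elif s[i] == '0':
--                 out = out + c + str(n) + '\''
--             n += 1
--         # conditions for next operations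
--         if c == 'z' and more == False:
--             c = 'A'
--         elif c == 'Z':
--             c = 'a'
--             more = True
--
--         elif more == False:
--             c = chr(ord(c) + 1)
--     return out
-- ===== SOURCE B (Python) =====
-- def binary_to_letter(s, POS):
--     def symbol(i):
--         if i < 26:
--             return chr(ord('a') + i)
--         if i < 52:
--             return chr(ord('A') + i - 26)
--         return 'a' + str(i - 52)
--     parts = []
--     for i, ch in enumerate(s):
--         if ch == '1':
--             parts.append(symbol(i))
--         elif ch == '0':
--             parts.append(symbol(i) + "'")
--     return ''.join(parts)
-- ===== Notes on version B (the rewrite author's own statement) =====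
-- stated objective: simpler
-- what changed: B computes each variable symbol directly from its index by closed-form arithmetic (chr(ord('a')+i), chr(ord('A')+i-26), 'a'+str(i-52)) and joins collected parts once at the end, eliminating A's running state variables c, more, n, its pointer-advance branching and its repeated string concatenation.
import Mathlib
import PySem

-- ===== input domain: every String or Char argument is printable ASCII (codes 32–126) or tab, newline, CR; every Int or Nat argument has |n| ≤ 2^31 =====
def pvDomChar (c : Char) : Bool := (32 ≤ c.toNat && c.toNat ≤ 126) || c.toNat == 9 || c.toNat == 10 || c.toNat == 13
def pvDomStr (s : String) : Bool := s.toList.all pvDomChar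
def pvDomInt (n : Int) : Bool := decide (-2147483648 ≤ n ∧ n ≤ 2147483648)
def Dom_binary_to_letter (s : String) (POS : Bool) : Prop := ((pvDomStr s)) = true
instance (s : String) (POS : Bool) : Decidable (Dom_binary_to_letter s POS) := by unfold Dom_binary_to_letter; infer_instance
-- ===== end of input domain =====

-- B is a stateless rewrite: each emitted symbol is computed from its index by closed-form
-- arithmetic instead of A's running character pointer / 'more' flag / counter, and joins the
-- parts once at the end instead of A's repeated string concatenation (objective: simpler).

-- ===== PORT A =====
-- the body of A's two 'if more == …' emission blocks (out-update of one loop iteration)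
def pvEmitA (ch : Char) (out : List Char) (c : Char) (more : Bool) (n : Int) : List Char :=
  let out := if more = false then
      (if ch = '1' then out ++ [c]
       else if ch = '0' then out ++ [c, '\''] else out)
    else out
  if more = true then
    (if ch = '1' then out ++ [c] ++ PySem.Int.toChars n
     else if ch = '0' then out ++ [c] ++ PySem.Int.toChars n ++ ['\''] else out)
  else out

-- A's for-loop over s with state (out, c, more, n)
def pvLoopA : List Char → List Char → Char → Bool → Int → List Char
  | [], out, _, _, _ => out
  | ch :: cs, out, c, more, n =>
    let out := pvEmitA ch out c more n
    let n := if more = true then n + 1 else n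
    if c = 'z' ∧ more = false then pvLoopA cs out 'A' more n
    else if c = 'Z' then pvLoopA cs out 'a' true n
    else if more = false then pvLoopA cs out (Char.ofNat (c.toNat + 1)) more n
    else pvLoopA cs out c more n

def binary_to_letter (s : String) (POS : Bool) : String :=
  String.mk (pvLoopA s.toList [] 'a' false 0)

-- ===== PORT B =====
-- Source B's symbol(i): variable name of position i, by closed-form index arithmetic
def pvSym (i : Nat) : List Char :=
  if i < 26 then [Char.ofNat (97 + i)]
  else if i < 52 then [Char.ofNat (65 + (i - 26))]
  else 'a' :: PySem.Int.toChars ((i : Int) - 52)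

-- Source B's enumerate loop collecting the parts (index-carrying recursion)
def pvGatherB : List Char → Nat → List Char
  | [], _ => []
  | ch :: cs, i =>
    (if ch = '1' then pvSym i
     else if ch = '0' then pvSym i ++ ['\''] else []) ++ pvGatherB cs (i + 1)

def binary_to_letter_alt (s : String) (POS : Bool) : String :=
  String.mk (pvGatherB s.toList 0)

-- ===== PRECONDITION & SPEC =====
def Spec_binary_to_letter (s : String) (POS : Bool) (out : String) : Prop := out = binary_to_letter_alt s POS
instance (s : String) (POS : Bool) (out : String) : Decidable (Spec_binary_to_letter s POS out) := by unfold Spec_binary_to_letter; infer_instance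

-- ===== CLAIM (what is proved, stated in full; the proofs are below) =====
def Claim_equal_binary_to_letter : Prop := ∀ (s : String) (POS : Bool), Dom_binary_to_letter s POS → Spec_binary_to_letter s POS (binary_to_letter s POS)

-- ===== LEMMAS AND PROOFS =====

theorem toNat_ofNat_small (n : Nat) (h : n < 55296) : (Char.ofNat n).toNat = n := by
  unfold Char.ofNat Char.ofNatAux
  rw [dif_pos (Or.inl h)]
  simp [Char.toNat, UInt32.toNat_ofNatLT]

-- A's loop state after i iterations, as closed forms of i
def pvStC (i : Nat) : Char :=
  if i < 26 then Char.ofNat (97 + i) else if i < 52 then Char.ofNat (65 + (i - 26)) else 'a'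
def pvStM (i : Nat) : Bool := decide (52 ≤ i)
def pvStN (i : Nat) : Int := if 52 ≤ i then (i : Int) - 52 else 0

theorem emitA_false (ch : Char) (out : List Char) (c : Char) (n : Int) :
    pvEmitA ch out c false n =
      out ++ (if ch = '1' then [c] else if ch = '0' then [c] ++ ['\''] else []) := by
  simp only [pvEmitA]
  split_ifs <;> simp_all

theorem emitA_true (ch : Char) (out : List Char) (c : Char) (n : Int) :
    pvEmitA ch out c true n =
      out ++ (if ch = '1' then c :: PySem.Int.toChars n
              else if ch = '0' then c :: PySem.Int.toChars n ++ ['\''] else []) := by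
  simp only [pvEmitA]
  split_ifs <;> simp_all

theorem pvLoopA_eq_gather (cs : List Char) (i : Nat) (out : List Char) :
    pvLoopA cs out (pvStC i) (pvStM i) (pvStN i) = out ++ pvGatherB cs i := by
  induction cs generalizing i out with
  | nil => simp [pvLoopA, pvGatherB]
  | cons ch cs IH =>
    rw [pvGatherB]
    by_cases h52 : 52 ≤ i
    · -- numbered-variable regime: state is ('a', true, i-52), every update arithmetic
      have hC : pvStC i = 'a' := by
        simp only [pvStC]; rw [if_neg (by omega), if_neg (by omega)]
      have hM : pvStM i = true := by simp [pvStM, h52]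
      have hN : pvStN i = (i : Int) - 52 := by simp [pvStN, h52]
      have hsym : pvSym i = 'a' :: PySem.Int.toChars ((i : Int) - 52) := by
        simp only [pvSym]; rw [if_neg (by omega), if_neg (by omega)]
      have hC' : ('a' : Char) = pvStC (i + 1) := by
        simp only [pvStC]; rw [if_neg (by omega), if_neg (by omega)]
      have hM' : (true : Bool) = pvStM (i + 1) := by
        simp only [pvStM]; rw [decide_eq_true (by omega : 52 ≤ i + 1)]
      have hN' : (i : Int) - 52 + 1 = pvStN (i + 1) := by
        simp only [pvStN]; rw [if_pos (by omega)]; push_cast; ring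
      rw [pvLoopA, hC, hM, hN, if_neg (by simp), if_neg (by decide), if_neg (by simp),
        if_pos rfl, emitA_true, hsym, hC', hM', hN', IH, List.append_assoc]
    · -- letter regime i < 52: more = false, the pointer is a lower/upper-case letter
      have hM : pvStM i = false := by simp [pvStM, h52]
      have hcode : pvStC i = Char.ofNat (if i < 26 then 97 + i else 65 + (i - 26)) := by
        simp only [pvStC]
        by_cases h26 : i < 26
        · rw [if_pos h26, if_pos h26]
        · rw [if_neg h26, if_pos (by omega : i < 52), if_neg h26]
      have hlt : (if i < 26 then 97 + i else 65 + (i - 26)) < 55296 := by split_ifs <;> omega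
      have htoNat : (pvStC i).toNat = (if i < 26 then 97 + i else 65 + (i - 26)) := by
        rw [hcode, toNat_ofNat_small _ hlt]
      have hsym : pvSym i = [pvStC i] := by
        simp only [pvSym, hcode]
        by_cases h26 : i < 26
        · rw [if_pos h26, if_pos h26]
        · rw [if_neg h26, if_pos (by omega : i < 52), if_neg h26]
      have hemit : pvEmitA ch out (pvStC i) (pvStM i) (pvStN i) =
          out ++ (if ch = '1' then pvSym i else if ch = '0' then pvSym i ++ ['\''] else []) := by
        rw [hM, emitA_false, hsym]
      have hz : pvStC i = 'z' ↔ i = 25 := by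
        constructor
        · intro h
          have h2 := congrArg Char.toNat h
          rw [htoNat] at h2
          have hzv : ('z' : Char).toNat = 122 := rfl
          rw [hzv] at h2
          by_cases h26 : i < 26
          · rw [if_pos h26] at h2; omega
          · rw [if_neg h26] at h2; omega
        · intro h; subst h; rw [hcode]; rfl
      have hZ : pvStC i = 'Z' ↔ i = 51 := by
        constructor
        · intro h
          have h2 := congrArg Char.toNat h
          rw [htoNat] at h2
          have hZv : ('Z' : Char).toNat = 90 := rfl
          rw [hZv] at h2
          by_cases h26 : i < 26
          · rw [if_pos h26] at h2; omega
          · rw [if_neg h26] at h2; omega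
        · intro h; subst h; rw [hcode]; rfl
      rw [pvLoopA, hemit, hM]
      by_cases h25 : i = 25
      · subst h25
        rw [if_pos ⟨hz.mpr rfl, rfl⟩,
          show (if (false : Bool) = true then pvStN 25 + 1 else pvStN 25) = pvStN 26 by decide,
          show ('A' : Char) = pvStC 26 by decide,
          show (false : Bool) = pvStM 26 by decide,
          IH, List.append_assoc]
      · by_cases h51 : i = 51
        · subst h51
          rw [if_neg (by rw [not_and]; intro h; exact absurd (hz.mp h) (by omega)),
            if_pos (hZ.mpr rfl),
            show (if (false : Bool) = true then pvStN 51 + 1 else pvStN 51) = pvStN 52 by decide,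
            show ('a' : Char) = pvStC 52 by decide,
            show (true : Bool) = pvStM 52 by decide,
            IH, List.append_assoc]
        · have hC' : Char.ofNat ((pvStC i).toNat + 1) = pvStC (i + 1) := by
            rw [htoNat]
            simp only [pvStC]
            by_cases h26 : i < 26
            · by_cases h24 : i < 25
              · rw [if_pos h26, if_pos (by omega : i + 1 < 26)]
                congr 1
              · omega
            · rw [if_neg h26, if_neg (by omega : ¬ i + 1 < 26),
                if_pos (by omega : i + 1 < 52)]
              congr 1
              omega
          have hM' : (false : Bool) = pvStM (i + 1) := by
            simp only [pvStM]; rw [decide_eq_false (by omega : ¬ 52 ≤ i + 1)]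
          have hN' : (if (false : Bool) = true then pvStN i + 1 else pvStN i) = pvStN (i + 1) := by
            rw [if_neg (by decide)]
            simp only [pvStN]
            rw [if_neg (by omega), if_neg (by omega)]
          rw [if_neg (by rw [not_and]; intro h; exact absurd (hz.mp h) h25),
            if_neg (fun h => h51 (hZ.mp h)), if_pos rfl, hN', hC', hM', IH, List.append_assoc]

-- ===== VERDICT (by name: the statement is the Claim_ definition above) =====
theorem binary_to_letter_spec : Claim_equal_binary_to_letter := by
  intro s POS _
  unfold Spec_binary_to_letter binary_to_letter binary_to_letter_alt
  rw [show ('a' : Char) = pvStC 0 by decide, show (false : Bool) = pvStM 0 by decide,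
    show (0 : Int) = pvStN 0 by decide, pvLoopA_eq_gather, List.nil_append]
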